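-- pv_equiv track=rewrite | github.com/EmilianoRdzV/MOCA | NOV13/collares.py | calcularSeg
-- ===== SOURCE A (Python) =====
-- def calcularSeg(n, m, collar):
--     collarDoble = collar + collar
--     sumaPref = [0] * (2 * n + 1)
--     for i in range(2 * n):
--         sumaPref[i + 1] = sumaPref[i] + collarDoble[i]
--
--     valMax = [0] * (m + 1)
--     for l in range(1, m + 1):
--         maxL = 0
--         for i in range(n):
--             maxL = max(maxL, sumaPref[i + l] - sumaPref[i])
--         valMax[l] = maxL
--     return valMax
-- ===== SOURCE B (Python) =====
-- def calcularSeg(n, m, collar):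
--     collarDoble = collar + collar
--     valMax = [0] * (m + 1)
--     for i in range(n):
--         s = 0
--         for l in range(1, m + 1):
--             s += collarDoble[i + l - 1]
--             if s > valMax[l]:
--                 valMax[l] = s
--     return valMax
-- ===== Notes on version B (the rewrite author's own statement) =====
-- stated objective: simpler
-- what changed: Dropped the prefix-sum table entirely: B loops over each start position once, accumulating the window sum incrementally and updating all per-length maxima in a single pass, instead of building a prefix array and re-scanning all starts for every length.
import Mathlib
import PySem

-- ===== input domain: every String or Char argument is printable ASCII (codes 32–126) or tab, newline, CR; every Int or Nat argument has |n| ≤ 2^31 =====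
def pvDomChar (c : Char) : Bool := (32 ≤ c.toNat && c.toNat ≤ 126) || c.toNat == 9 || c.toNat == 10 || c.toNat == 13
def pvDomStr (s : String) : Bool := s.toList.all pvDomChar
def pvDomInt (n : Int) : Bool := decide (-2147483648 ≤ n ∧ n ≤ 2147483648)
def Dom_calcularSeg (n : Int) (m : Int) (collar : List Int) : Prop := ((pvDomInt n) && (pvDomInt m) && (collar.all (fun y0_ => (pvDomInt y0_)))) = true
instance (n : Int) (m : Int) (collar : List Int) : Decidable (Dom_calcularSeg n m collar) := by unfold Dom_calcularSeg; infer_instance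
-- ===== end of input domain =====

-- B drops A's prefix-sum table: one pass over start positions with an incremental window sum
-- updating all per-length maxima (same asymptotic cost, simpler structure); return value only.

-- ===== PORT A =====
def calcularSeg (n : Int) (m : Int) (collar : List Int) : List Int :=
  let collarDoble := collar ++ collar
  let sumaPref0 := PySem.List.pyRepeat [(0 : Int)] (2 * n + 1)
  let sumaPref := (PySem.List.pyRange 0 (2 * n) 1).foldl
    (fun sp i =>
      PySem.List.pySetD sp (i + 1)
        (PySem.List.pyGetD sp i 0 + PySem.List.pyGetD collarDoble i 0)) sumaPref0
  let valMax0 := PySem.List.pyRepeat [(0 : Int)] (m + 1)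
  (PySem.List.pyRange 1 (m + 1) 1).foldl
    (fun vm l =>
      let maxL := (PySem.List.pyRange 0 n 1).foldl
        (fun mx i => max mx (PySem.List.pyGetD sumaPref (i + l) 0 - PySem.List.pyGetD sumaPref i 0)) 0
      PySem.List.pySetD vm l maxL) valMax0

-- ===== PORT B =====
def calcularSeg_alt (n : Int) (m : Int) (collar : List Int) : List Int :=
  let collarDoble := collar ++ collar
  let valMax0 := PySem.List.pyRepeat [(0 : Int)] (m + 1)
  (PySem.List.pyRange 0 n 1).foldl
    (fun vm i =>
      ((PySem.List.pyRange 1 (m + 1) 1).foldl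
        (fun (p : List Int × Int) l =>
          let s := p.2 + PySem.List.pyGetD collarDoble (i + l - 1) 0
          (if s > PySem.List.pyGetD p.1 l 0 then PySem.List.pySetD p.1 l s else p.1, s))
        (vm, 0)).1) valMax0

-- ===== PRECONDITION & SPEC =====
-- Pre excludes exactly the inputs where A raises IndexError: with n ≥ 1, either n exceeds
-- len(collar) (prefix loop overruns collar+collar) or m > n+1 (sumaPref[i+l] overruns).
def Pre_calcularSeg (n : Int) (m : Int) (collar : List Int) : Prop :=
  1 ≤ n → (n ≤ (collar.length : Int) ∧ m ≤ n + 1)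
instance (n : Int) (m : Int) (collar : List Int) : Decidable (Pre_calcularSeg n m collar) := by
  unfold Pre_calcularSeg; infer_instance

def pvWitness_calcularSeg : Int × Int × List Int := (3, 2, [1, -2, 3])

def Spec_calcularSeg (n : Int) (m : Int) (collar : List Int) (out : List Int) : Prop := out = calcularSeg_alt n m collar
instance (n : Int) (m : Int) (collar : List Int) (out : List Int) : Decidable (Spec_calcularSeg n m collar out) := by unfold Spec_calcularSeg; infer_instance

-- ===== CLAIM (what is proved, stated in full; the proofs are below) =====
def Claim_equal_calcularSeg : Prop := ∀ (n : Int) (m : Int) (collar : List Int), Dom_calcularSeg n m collar → Pre_calcularSeg n m collar → Spec_calcularSeg n m collar (calcularSeg n m collar)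

-- ===== LEMMAS AND PROOFS =====

-- prefix sum of the doubled collar
def preS (cd : List Int) (k : Nat) : Int := (cd.take k).sum

-- reference value: max over the first N start positions of the length-k window sum, floored at 0
def gRef (cd : List Int) (N k : Nat) : Int :=
  (List.range N).foldl (fun mx i => max mx (preS cd (i + k) - preS cd i)) 0

lemma preS_succ (cd : List Int) (j : Nat) : preS cd (j + 1) = preS cd j + cd.getD j 0 := by
  unfold preS
  rcases lt_or_ge j cd.length with h | h
  · rw [List.sum_take_succ _ _ h]
    simp [List.getD, List.getElem?_eq_getElem h]
  · rw [List.take_of_length_le h, List.take_of_length_le (by omega)]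
    simp [List.getD, List.getElem?_eq_none_iff.mpr h]

lemma eq_of_getD (xs ys : List Int) (hl : xs.length = ys.length)
    (h : ∀ k, xs.getD k 0 = ys.getD k 0) : xs = ys := by
  apply List.ext_getElem hl
  intro k h1 h2
  have := h k
  rwa [List.getD_eq_getElem xs 0 h1, List.getD_eq_getElem ys 0 h2] at this

lemma getD_set_int (xs : List Int) (i j : Nat) (v : Int) :
    (xs.set i v).getD j 0 = if j = i ∧ j < xs.length then v else xs.getD j 0 := by
  simp only [List.getD, List.getElem?_set]
  by_cases h1 : i = j
  · subst h1
    by_cases h2 : i < xs.length <;> simp [h2]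
  · simp only [h1, if_false]
    rw [if_neg]
    intro hc
    exact h1 hc.1.symm

lemma getD_replicate_zero (M j : Nat) : (List.replicate M (0:Int)).getD j 0 = 0 := by
  simp [List.getD, List.getElem?_replicate]
  split_ifs <;> simp

-- A's valMax loop: setting position l to f l for l in range(a, b)
lemma setFoldChar (f : Int → Int) (b : Int) : ∀ (t : Nat) (a : Int) (vm : List Int), 0 ≤ a →
    (b - a).toNat = t →
    ((PySem.List.pyRange a b 1).foldl (fun vm l => PySem.List.pySetD vm l (f l)) vm).length = vm.length
    ∧ ∀ j : Nat, ((PySem.List.pyRange a b 1).foldl (fun vm l => PySem.List.pySetD vm l (f l)) vm).getD j 0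
        = if a ≤ (j:Int) ∧ (j:Int) < b ∧ j < vm.length then f j else vm.getD j 0 := by
  intro t
  induction t with
  | zero =>
    intro a vm ha ht
    rw [PySem.List.pyRange_one_eq_nil (by omega)]
    refine ⟨by simp, fun j => ?_⟩
    simp only [List.foldl_nil]
    rw [if_neg (by omega)]
  | succ t ih =>
    intro a vm ha ht
    rw [PySem.List.pyRange_one_cons (by omega), List.foldl_cons]
    have hset : PySem.List.pySetD vm a (f a) = vm.set a.toNat (f a) :=
      PySem.List.pySetD_of_nonneg _ _ ha
    have hlen : (PySem.List.pySetD vm a (f a)).length = vm.length := by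
      rw [hset, List.length_set]
    obtain ⟨ihL, ihG⟩ := ih (a+1) (PySem.List.pySetD vm a (f a)) (by omega) (by omega)
    refine ⟨by rw [ihL, hlen], fun j => ?_⟩
    rw [ihG j, hlen, hset, getD_set_int]
    have hfa : (j:Int) = a → f a = f j := fun h => by rw [h]
    split_ifs <;> first | rfl | omega | exact hfa (by omega) | exact (hfa (by omega)).symm

-- one iteration of A's prefix-sum loop
lemma stepChar (cd sp : List Int) (T : Nat) (t : Nat)
    (hL : sp.length = T + 1)
    (hG : ∀ j : Nat, sp.getD j 0 = if j ≤ t then preS cd j else 0)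
    (hti : t + 1 ≤ T) :
    (PySem.List.pySetD sp ((t:Int) + 1)
      (PySem.List.pyGetD sp (t:Int) 0 + PySem.List.pyGetD cd (t:Int) 0)).length = T + 1
    ∧ ∀ j : Nat, (PySem.List.pySetD sp ((t:Int) + 1)
      (PySem.List.pyGetD sp (t:Int) 0 + PySem.List.pyGetD cd (t:Int) 0)).getD j 0
        = if j ≤ t + 1 then preS cd j else 0 := by
  have h1 : PySem.List.pyGetD sp (t:Int) 0 = preS cd t := by
    rw [PySem.List.pyGetD_natCast, hG t, if_pos (le_refl t)]
  have h2 : PySem.List.pyGetD cd (t:Int) 0 = cd.getD t 0 := PySem.List.pyGetD_natCast _ _ _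
  have hcast : ((t:Int) + 1) = ((t+1 : Nat) : Int) := by push_cast; ring
  rw [h1, h2, hcast, PySem.List.pySetD_natCast]
  refine ⟨by rw [List.length_set, hL], fun j => ?_⟩
  rw [getD_set_int, hG j, hL]
  by_cases hj : j = t + 1
  · subst hj
    rw [if_pos ⟨rfl, by omega⟩, if_pos (le_refl _), ← preS_succ]
  · rw [if_neg (fun h => hj h.1)]
    split_ifs <;> first | rfl | omega

-- the sumaPref loop of A: prefix sums of the doubled collar
lemma spChar (cd : List Int) (T : Nat) :
    ∀ (t : Nat), t ≤ T →
    ((PySem.List.pyRange 0 (t:Int) 1).foldl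
      (fun sp i => PySem.List.pySetD sp (i + 1)
        (PySem.List.pyGetD sp i 0 + PySem.List.pyGetD cd i 0))
      (List.replicate (T+1) (0:Int))).length = T + 1
    ∧ ∀ j : Nat, ((PySem.List.pyRange 0 (t:Int) 1).foldl
      (fun sp i => PySem.List.pySetD sp (i + 1)
        (PySem.List.pyGetD sp i 0 + PySem.List.pyGetD cd i 0))
      (List.replicate (T+1) (0:Int))).getD j 0 = if j ≤ t then preS cd j else 0 := by
  intro t
  induction t with
  | zero =>
    intro ht
    rw [Nat.cast_zero, PySem.List.pyRange_one_eq_nil (le_refl 0)]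
    simp only [List.foldl_nil]
    refine ⟨List.length_replicate, fun j => ?_⟩
    rw [getD_replicate_zero]
    by_cases hj : j = 0
    · subst hj; simp [preS]
    · rw [if_neg (by omega)]
  | succ t ih =>
    intro ht
    obtain ⟨ihL, ihG⟩ := ih (by omega)
    rw [show (((t+1 : Nat)):Int) = (t:Int) + 1 by push_cast; ring,
       PySem.List.pyRange_one_succ_right (by omega), List.foldl_append, List.foldl_cons,
       List.foldl_nil]
    exact stepChar cd _ T t ihL ihG (by omega)

-- B's inner loop for one start position i: incremental window sums, updating maxima
lemma innerChar (cd : List Int) (i : Int) (hi : 0 ≤ i) : ∀ (t : Nat) (vm : List Int),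
    ((PySem.List.pyRange 1 (1 + (t:Int)) 1).foldl
      (fun (p : List Int × Int) l =>
        (if p.2 + PySem.List.pyGetD cd (i + l - 1) 0 > PySem.List.pyGetD p.1 l 0
         then PySem.List.pySetD p.1 l (p.2 + PySem.List.pyGetD cd (i + l - 1) 0) else p.1,
         p.2 + PySem.List.pyGetD cd (i + l - 1) 0))
      (vm, 0)).2 = preS cd (i.toNat + t) - preS cd i.toNat
    ∧ ((PySem.List.pyRange 1 (1 + (t:Int)) 1).foldl
      (fun (p : List Int × Int) l =>
        (if p.2 + PySem.List.pyGetD cd (i + l - 1) 0 > PySem.List.pyGetD p.1 l 0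
         then PySem.List.pySetD p.1 l (p.2 + PySem.List.pyGetD cd (i + l - 1) 0) else p.1,
         p.2 + PySem.List.pyGetD cd (i + l - 1) 0))
      (vm, 0)).1.length = vm.length
    ∧ ∀ j : Nat, ((PySem.List.pyRange 1 (1 + (t:Int)) 1).foldl
      (fun (p : List Int × Int) l =>
        (if p.2 + PySem.List.pyGetD cd (i + l - 1) 0 > PySem.List.pyGetD p.1 l 0
         then PySem.List.pySetD p.1 l (p.2 + PySem.List.pyGetD cd (i + l - 1) 0) else p.1,
         p.2 + PySem.List.pyGetD cd (i + l - 1) 0))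
      (vm, 0)).1.getD j 0
        = if 1 ≤ j ∧ j ≤ t ∧ j < vm.length
          then max (vm.getD j 0) (preS cd (i.toNat + j) - preS cd i.toNat)
          else vm.getD j 0 := by
  intro t
  induction t with
  | zero =>
    intro vm
    rw [Nat.cast_zero, add_zero, PySem.List.pyRange_one_eq_nil (le_refl 1)]
    refine ⟨by simp, by simp, fun j => ?_⟩
    simp only [List.foldl_nil]
    rw [if_neg (by omega)]
  | succ t ih =>
    intro vm
    obtain ⟨ih2, ihL, ihG⟩ := ih vm
    rw [show (1 + ((t+1:Nat):Int)) = (1 + (t:Int)) + 1 by push_cast; ring,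
       PySem.List.pyRange_one_succ_right (by omega), List.foldl_append, List.foldl_cons,
       List.foldl_nil]
    simp only []
    have hidx : i + (1 + (t:Int)) - 1 = ((i.toNat + t : Nat) : Int) := by omega
    have hl1 : (1 + (t:Int)) = ((1 + t : Nat) : Int) := by push_cast; ring
    have hgetAll : ∀ (L : List Int), PySem.List.pyGetD L (1 + (t:Int)) 0 = L.getD (1+t) 0 :=
      fun L => by rw [hl1, PySem.List.pyGetD_natCast]
    have hsetAll : ∀ (L : List Int) (v : Int),
        PySem.List.pySetD L (1 + (t:Int)) v = L.set (1+t) v :=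
      fun L v => by rw [hl1, PySem.List.pySetD_natCast]
    rw [hidx]
    simp only [PySem.List.pyGetD_natCast]
    have hold := ihG (1+t)
    rw [if_neg (by omega : ¬(1 ≤ 1+t ∧ 1+t ≤ t ∧ 1+t < vm.length))] at hold
    rw [ih2, hgetAll, hold, hsetAll]
    have hpre := preS_succ cd (i.toNat + t)
    have hargs : i.toNat + (t + 1) = i.toNat + t + 1 := by omega
    refine ⟨by rw [hargs]; omega, ?_, ?_⟩
    · split_ifs <;> simp [List.length_set, ihL]
    · intro j
      by_cases hcmp : preS cd (i.toNat + t) - preS cd i.toNat + cd.getD (i.toNat + t) 0 >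
          vm.getD (1+t) 0
      · rw [if_pos hcmp, getD_set_int, ihG j, ihL]
        by_cases hj : j = 1 + t
        · subst hj
          by_cases hr : 1 + t < vm.length
          · rw [if_pos ⟨rfl, hr⟩, if_pos ⟨by omega, by omega, hr⟩,
               show i.toNat + (1 + t) = i.toNat + t + 1 by omega]
            omega
          · rw [if_neg (fun h => hr h.2), if_neg (by omega), if_neg (by omega)]
        · rw [if_neg (fun h => hj h.1)]
          split_ifs <;> first | rfl | omega
      · rw [if_neg hcmp, ihG j]
        by_cases hj : j = 1 + t
        · subst hj
          rw [if_neg (by omega), show i.toNat + (1 + t) = i.toNat + t + 1 by omega]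
          split_ifs <;> omega
        · split_ifs <;> first | rfl | omega

lemma gRef_succ (cd : List Int) (N k : Nat) :
    gRef cd (N+1) k = max (gRef cd N k) (preS cd (N + k) - preS cd N) := by
  unfold gRef
  rw [List.range_succ, List.foldl_append]
  rfl

-- one outer iteration of B
lemma outerStep (cd o : List Int) (m : Int) (c : Nat)
    (hL : o.length = (m+1).toNat)
    (hG : ∀ j : Nat, o.getD j 0 = if 1 ≤ j ∧ j < (m+1).toNat then gRef cd c j else 0) :
    ((PySem.List.pyRange 1 (1 + (m.toNat:Int)) 1).foldl
      (fun (p : List Int × Int) l =>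
        (if p.2 + PySem.List.pyGetD cd ((c:Int) + l - 1) 0 > PySem.List.pyGetD p.1 l 0
         then PySem.List.pySetD p.1 l (p.2 + PySem.List.pyGetD cd ((c:Int) + l - 1) 0) else p.1,
         p.2 + PySem.List.pyGetD cd ((c:Int) + l - 1) 0))
      (o, 0)).1.length = (m+1).toNat
    ∧ ∀ j : Nat, ((PySem.List.pyRange 1 (1 + (m.toNat:Int)) 1).foldl
      (fun (p : List Int × Int) l =>
        (if p.2 + PySem.List.pyGetD cd ((c:Int) + l - 1) 0 > PySem.List.pyGetD p.1 l 0
         then PySem.List.pySetD p.1 l (p.2 + PySem.List.pyGetD cd ((c:Int) + l - 1) 0) else p.1,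
         p.2 + PySem.List.pyGetD cd ((c:Int) + l - 1) 0))
      (o, 0)).1.getD j 0
        = if 1 ≤ j ∧ j < (m+1).toNat then gRef cd (c+1) j else 0 := by
  obtain ⟨h2, hLen, hGin⟩ := innerChar cd (c:Int) (by omega) m.toNat o
  refine ⟨by rw [hLen, hL], fun j => ?_⟩
  rw [hGin j, hL, Int.toNat_natCast, hG j, gRef_succ]
  split_ifs <;> first | rfl | omega

-- B's outer loop invariant
lemma outerChar (cd : List Int) (m : Int) : ∀ (c : Nat),
    ((PySem.List.pyRange 0 (c:Int) 1).foldl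
      (fun vm i =>
        ((PySem.List.pyRange 1 (1 + (m.toNat:Int)) 1).foldl
          (fun (p : List Int × Int) l =>
            (if p.2 + PySem.List.pyGetD cd (i + l - 1) 0 > PySem.List.pyGetD p.1 l 0
             then PySem.List.pySetD p.1 l (p.2 + PySem.List.pyGetD cd (i + l - 1) 0) else p.1,
             p.2 + PySem.List.pyGetD cd (i + l - 1) 0))
          (vm, 0)).1)
      (List.replicate (m+1).toNat (0:Int))).length = (m+1).toNat
    ∧ ∀ j : Nat, ((PySem.List.pyRange 0 (c:Int) 1).foldl
      (fun vm i =>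
        ((PySem.List.pyRange 1 (1 + (m.toNat:Int)) 1).foldl
          (fun (p : List Int × Int) l =>
            (if p.2 + PySem.List.pyGetD cd (i + l - 1) 0 > PySem.List.pyGetD p.1 l 0
             then PySem.List.pySetD p.1 l (p.2 + PySem.List.pyGetD cd (i + l - 1) 0) else p.1,
             p.2 + PySem.List.pyGetD cd (i + l - 1) 0))
          (vm, 0)).1)
      (List.replicate (m+1).toNat (0:Int))).getD j 0
        = if 1 ≤ j ∧ j < (m+1).toNat then gRef cd c j else 0 := by
  intro c
  induction c with
  | zero =>
    rw [Nat.cast_zero, PySem.List.pyRange_one_eq_nil (le_refl 0)]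
    simp only [List.foldl_nil]
    refine ⟨List.length_replicate, fun j => ?_⟩
    rw [getD_replicate_zero]
    split_ifs <;> simp [gRef]
  | succ c ih =>
    obtain ⟨ihL, ihG⟩ := ih
    rw [show (((c+1:Nat)):Int) = (c:Int) + 1 by push_cast; ring,
       PySem.List.pyRange_one_succ_right (by omega), List.foldl_append, List.foldl_cons,
       List.foldl_nil]
    exact outerStep cd _ m c ihL ihG

-- bridging A's per-length inner maximum to the reference value
lemma fBridge (cd sp : List Int) (N : Nat) (m : Int) (j : Nat)
    (hsp : ∀ k : Nat, sp.getD k 0 = if k ≤ 2*N then preS cd k else 0)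
    (hjm : (j:Int) ≤ m) (hmn : m ≤ (N:Int) + 1) :
    (PySem.List.pyRange 0 (N:Int) 1).foldl
      (fun mx i => max mx (PySem.List.pyGetD sp (i + (j:Int)) 0 - PySem.List.pyGetD sp i 0)) 0
    = gRef cd N j := by
  rw [PySem.List.pyRange_zero_natCast, List.foldl_map]
  unfold gRef
  apply PySem.List.foldl_congr_mem
  intro acc k hk
  have hkN : k < N := by simpa using List.mem_range.mp (by simpa using hk)
  have hc1 : ((k:Int) + (j:Int)) = ((k + j : Nat) : Int) := by push_cast; ring
  rw [hc1, PySem.List.pyGetD_natCast, PySem.List.pyGetD_natCast, hsp (k+j), hsp k,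
     if_pos (by omega), if_pos (by omega)]

-- ===== VERDICT (by name: the statement is the Claim_ definition above) =====
theorem calcularSeg_spec : Claim_equal_calcularSeg := by
  intro n m collar hdom hpre
  unfold Spec_calcularSeg
  unfold Pre_calcularSeg at hpre
  simp only [calcularSeg, calcularSeg_alt, PySem.List.pyRepeat_singleton]
  have hbound : PySem.List.pyRange 1 (m+1) 1 = PySem.List.pyRange 1 (1 + (m.toNat:Int)) 1 := by
    by_cases h : 0 ≤ m
    · congr 1; omega
    · rw [PySem.List.pyRange_one_eq_nil (by omega), PySem.List.pyRange_one_eq_nil (by omega)]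
  simp only [hbound]
  by_cases hn : n ≤ 0
  · -- no start positions at all: both results are the all-zero list
    have hn0 : PySem.List.pyRange 0 n 1 = ([] : List Int) :=
      PySem.List.pyRange_one_eq_nil (by omega)
    simp only [hn0, List.foldl_nil]
    obtain ⟨aL, aG⟩ := setFoldChar (fun _ => (0:Int)) (1 + (m.toNat:Int)) m.toNat 1
      (List.replicate (m+1).toNat 0) (by omega) (by omega)
    refine eq_of_getD _ _ (by rw [aL]) fun j => ?_
    rw [aG j, getD_replicate_zero]
    split_ifs <;> rfl
  · obtain ⟨hlen, hm⟩ := hpre (by omega)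
    obtain ⟨N, hN1, hN⟩ : ∃ N : Nat, 1 ≤ N ∧ n = (N:Int) := ⟨n.toNat, by omega, by omega⟩
    simp only [hN]
    have hT : (2 * ((N:Nat):Int)) = ((2*N : Nat):Int) := by push_cast; ring
    simp only [hT, show ((((2*N : Nat):Int)) + 1).toNat = 2*N + 1 by omega]
    obtain ⟨spL, spG⟩ := spChar (collar ++ collar) (2*N) (2*N) (le_refl _)
    obtain ⟨bL, bG⟩ := outerChar (collar ++ collar) m N
    refine eq_of_getD _ _ ?_ fun j => ?_
    · rw [(setFoldChar _ (1 + (m.toNat:Int)) m.toNat 1 _ (by omega) (by omega)).1, bL,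
         List.length_replicate]
    · rw [(setFoldChar _ (1 + (m.toNat:Int)) m.toNat 1 _ (by omega) (by omega)).2 j, bG j,
         List.length_replicate, getD_replicate_zero]
      by_cases hcond : 1 ≤ j ∧ j < (m+1).toNat
      · rw [if_pos ⟨by omega, by omega, hcond.2⟩, if_pos hcond]
        exact fBridge (collar ++ collar) _ N m j spG (by omega) (by omega)
      · rw [if_neg (by omega), if_neg hcond]
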